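-- pv_equiv track=rewrite | github.com/daniel-reich/ubiquitous-fiesta | F77JQs68RSeTBiGtv_22.py | diamond_sum
-- ===== SOURCE A (Python) =====
-- def diamond_sum(n):
--   out=0
--   for i in range(n):
--     m=i*n + n//2 +1
--     o=i if i<n//2 else n-i-1
--     out+=m-o
--     if o>0:out+=m+o
--
--   return out
-- ===== SOURCE B (Python) =====
-- def diamond_sum(n):
--   # Closed form: each row contributes 2*m except the first and last rows (o == 0),
--   # which contribute m once.  Sum of m over rows is an arithmetic series.
--   if n <= 0:
--     return 0
--   h = n // 2
--   total = n*n*(n-1) + 2*n*(h+1) - (h+1)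
--   if n >= 2:
--     total -= n*(n-1) + h + 1
--   return total
-- ===== Notes on version B (the rewrite author's own statement) =====
-- stated objective: faster
-- what changed: Replaced the O(n) row loop by a closed-form arithmetic-series formula (sum of 2*m over all rows minus the single-count first and last rows).
import Mathlib
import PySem

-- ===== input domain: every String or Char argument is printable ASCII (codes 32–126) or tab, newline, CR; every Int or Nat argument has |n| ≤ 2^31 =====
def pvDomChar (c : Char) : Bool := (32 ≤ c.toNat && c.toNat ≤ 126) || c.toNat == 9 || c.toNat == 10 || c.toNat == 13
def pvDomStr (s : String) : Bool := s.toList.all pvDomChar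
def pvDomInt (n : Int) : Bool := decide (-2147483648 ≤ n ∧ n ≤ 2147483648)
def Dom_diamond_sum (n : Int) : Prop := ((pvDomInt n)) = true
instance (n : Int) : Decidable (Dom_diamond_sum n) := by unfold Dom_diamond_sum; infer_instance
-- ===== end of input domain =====

-- B replaces A's O(n) row loop by a closed-form arithmetic-series formula (O(1)).

-- ===== PORT A =====
-- loop body of A (out += m-o; if o>0: out += m+o)
def pvStep (n : Int) (out i : Int) : Int :=
  let m := i * n + PySem.Int.floordiv n 2 + 1
  let o := if i < PySem.Int.floordiv n 2 then i else n - i - 1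
  let out := out + (m - o)
  if o > 0 then out + (m + o) else out

def diamond_sum (n : Int) : Int :=
  (PySem.List.pyRange 0 n 1).foldl (pvStep n) 0

-- ===== PORT B =====
def diamond_sum_alt (n : Int) : Int :=
  if n ≤ 0 then 0
  else
    let h := PySem.Int.floordiv n 2
    let total := n * n * (n - 1) + 2 * n * (h + 1) - (h + 1)
    if 2 ≤ n then total - (n * (n - 1) + h + 1) else total

-- ===== PRECONDITION & SPEC =====
def Spec_diamond_sum (n : Int) (out : Int) : Prop := out = diamond_sum_alt n
instance (n : Int) (out : Int) : Decidable (Spec_diamond_sum n out) := by unfold Spec_diamond_sum; infer_instance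

-- ===== CLAIM (what is proved, stated in full; the proofs are below) =====
def Claim_equal_diamond_sum : Prop := ∀ (n : Int), Dom_diamond_sum n → Spec_diamond_sum n (diamond_sum n)

-- ===== LEMMAS AND PROOFS =====

-- partial-sum closed form: value of A's accumulator after the first k iterations
def pvG (n k : Int) : Int :=
  n * k * (k - 1) + 2 * k * (PySem.Int.floordiv n 2 + 1)
    - (if 1 ≤ k then PySem.Int.floordiv n 2 + 1 else 0)
    - (if k = n ∧ 2 ≤ n then (n - 1) * n + PySem.Int.floordiv n 2 + 1 else 0)

lemma pvH_spec (n : Int) (hn : 0 < n) :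
    2 * PySem.Int.floordiv n 2 ≤ n ∧ n < 2 * PySem.Int.floordiv n 2 + 2 := by
  rw [PySem.Int.floordiv_eq_ediv_of_pos (by norm_num)]
  omega

lemma pv_step (n k : Int) (hk0 : 0 ≤ k) (hkn : k < n) :
    pvStep n (pvG n k) k = pvG n (k + 1) := by
  have hh := pvH_spec n (by omega)
  have hif4 : ¬ (k = n ∧ 2 ≤ n) := by omega
  have hif3' : (1 : Int) ≤ k + 1 := by omega
  simp only [pvStep, pvG, hif4, if_false, if_pos hif3']
  by_cases hc6 : k + 1 = n ∧ 2 ≤ n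
  · have hk1 : (1 : Int) ≤ k := by omega
    have hbr : ¬ (k < PySem.Int.floordiv n 2) := by omega
    rw [if_neg hbr, if_pos hk1, if_pos hc6]
    have ho : ¬ (0 < n - k - 1) := by omega
    rw [if_neg ho]
    obtain ⟨hn1, _⟩ := hc6
    subst hn1
    ring
  · by_cases hk0' : k = 0
    · subst hk0'
      norm_num
      split_ifs <;> omega
    · have hk1 : (1 : Int) ≤ k := by omega
      rw [if_pos hk1, if_neg hc6]
      by_cases hb : k < PySem.Int.floordiv n 2
      · rw [if_pos hb, if_pos (show (0:Int) < k by omega)]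
        ring
      · rw [if_neg hb, if_pos (show (0:Int) < n - k - 1 by omega)]
        ring

lemma pv_fold (n : Int) (hn : 0 < n) :
    ∀ k : Nat, (k : Int) ≤ n →
      (PySem.List.pyRange 0 (k : Int) 1).foldl (pvStep n) 0 = pvG n (k : Int) := by
  intro k
  induction k with
  | zero =>
      intro _
      simp only [Nat.cast_zero, PySem.List.pyRange_one_eq_nil (le_refl 0), List.foldl_nil, pvG]
      split_ifs <;> omega
  | succ k ih =>
      intro hle
      have hk : (k : Int) ≤ n := by push_cast at hle ⊢; omega
      rw [show ((k + 1 : Nat) : Int) = (k : Int) + 1 by push_cast; ring,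
          PySem.List.pyRange_one_succ_right (by positivity), List.foldl_append]
      rw [ih hk]
      simp only [List.foldl_cons, List.foldl_nil]
      exact pv_step n k (by positivity) (by push_cast at hle; omega)

-- ===== VERDICT (by name: the statement is the Claim_ definition above) =====
theorem diamond_sum_spec : Claim_equal_diamond_sum := by
  intro n _
  show diamond_sum n = diamond_sum_alt n
  by_cases hn : n ≤ 0
  · simp [diamond_sum, diamond_sum_alt, PySem.List.pyRange_one_eq_nil hn, hn]
  · push Not at hn
    have hcast : ((n.toNat : Int)) = n := Int.toNat_of_nonneg (by omega)
    have hfold := pv_fold n hn n.toNat (by omega)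
    rw [hcast] at hfold
    rw [diamond_sum, hfold]
    simp only [diamond_sum_alt, pvG, if_neg (by omega : ¬ n ≤ 0), if_pos (by omega : (1:Int) ≤ n)]
    by_cases h2 : 2 ≤ n
    · rw [if_pos (⟨trivial, h2⟩ : True ∧ 2 ≤ n), if_pos h2]; ring
    · rw [if_neg (by simp [h2] : ¬ (True ∧ 2 ≤ n)), if_neg h2]; ring
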